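-- pv_equiv track=rewrite | github.com/Privatech38/programiranje1 | domaceNaloge/teden6/angelcin_zapis.py | zapisi
-- ===== SOURCE A (Python) =====
-- import itertools
--
-- def intervali(xs):
--     nizi = []
--     for interval in xs:
--         nizi.append(str(interval[0]) + "-"*(interval[1] - interval[0] + 1))
--     return nizi
--
-- def zapisi_vrstico(y, xs):
--     return f"({y}) " + " ".join(intervali(xs))
--
-- def zapisi(ovire):
--     jaoo = []
--     jaoo = []
--     for y, xs in itertools.groupby(sorted(ovire, key=lambda x: (x[2], x[0])), lambda x: x[2]):
--         inters = []
--         for interval in xs: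
--             inters.append((interval[0], interval[1]))
--         jaoo.append(zapisi_vrstico(y, inters))
--     return "\n".join(jaoo)
-- ===== SOURCE B (Python) =====
-- def zapisi(ovire):
--     vrstice = []
--     for y in sorted({t[2] for t in ovire}):
--         xs = sorted((t for t in ovire if t[2] == y), key=lambda t: t[0])
--         polja = " ".join(str(x0) + "-" * (x1 - x0 + 1) for x0, x1, _ in xs)
--         vrstice.append(f"({y}) " + polja)
--     return "\n".join(vrstice)
-- ===== Notes on version B (the rewrite author's own statement) =====
-- stated objective: alternative
-- what changed: B replaces A's global sort by the tuple key (y,x0) followed by itertools.groupby with a direct per-row construction: iterate the sorted distinct y values and, for each, select that row's obstacles and stably sort them by x0 alone.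
import Mathlib
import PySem

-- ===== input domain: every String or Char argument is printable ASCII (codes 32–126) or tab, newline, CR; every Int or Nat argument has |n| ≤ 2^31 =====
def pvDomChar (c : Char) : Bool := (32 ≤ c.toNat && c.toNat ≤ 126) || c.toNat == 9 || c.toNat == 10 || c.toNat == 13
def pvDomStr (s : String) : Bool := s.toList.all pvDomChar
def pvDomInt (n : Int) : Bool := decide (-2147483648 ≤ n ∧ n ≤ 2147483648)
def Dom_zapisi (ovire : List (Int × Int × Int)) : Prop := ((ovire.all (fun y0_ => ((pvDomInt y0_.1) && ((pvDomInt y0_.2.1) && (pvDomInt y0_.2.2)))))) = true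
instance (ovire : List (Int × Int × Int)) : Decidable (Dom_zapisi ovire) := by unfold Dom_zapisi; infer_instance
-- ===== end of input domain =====

-- B replaces A's global (y,x0)-keyed sort + itertools.groupby with a per-row construction
-- (sorted distinct y values, each row's obstacles stably sorted by x0 alone): an alternative
-- decomposition of the same output, proved equal for every input.


-- ===== PORT A =====
-- helper intervali: "-"*k for k ≤ 0 is "" — ported exactly by List.replicate k.toNat
def intervali (xs : List (Int × Int)) : List String :=
  xs.foldl (fun nizi i =>
    nizi ++ [PySem.Int.toStr i.1 ++ String.ofList (List.replicate (i.2 - i.1 + 1).toNat '-')]) []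

def zapisi_vrstico (y : Int) (xs : List (Int × Int)) : String :=
  "(" ++ PySem.Int.toStr y ++ ") " ++ PySem.Str.join " " (intervali xs)

-- itertools.groupby with key = x[2]: consecutive runs of equal key (hand-ported, exact on lists)
def groupByY : List (Int × Int × Int) → List (Int × List (Int × Int × Int))
  | [] => []
  | t :: ts =>
      (t.2.2, t :: ts.takeWhile (fun u => u.2.2 == t.2.2)) ::
        groupByY (ts.dropWhile (fun u => u.2.2 == t.2.2))
  termination_by l => l.length
  decreasing_by
    simp only [List.length_cons]
    have := List.length_dropWhile_le (p := fun u => u.2.2 == t.2.2) (l := ts)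
    omega

def zapisi (ovire : List (Int × Int × Int)) : String :=
  PySem.Str.join "\n"
    ((groupByY (PySem.List.sorted2 ovire (fun x => x.2.2) (fun x => x.1))).foldl
      (fun jaoo g =>
        jaoo ++ [zapisi_vrstico g.1
          (g.2.foldl (fun inters interval => inters ++ [(interval.1, interval.2.1)]) [])]) [])

-- ===== PORT B =====
def zapisi_alt (ovire : List (Int × Int × Int)) : String :=
  PySem.Str.join "\n"
    ((PySem.List.sorted (PySem.Set.ofList (ovire.map (fun t => t.2.2))) (fun y => y)).foldl
      (fun vrstice y =>
        let xs := PySem.List.sorted (ovire.filter (fun t => t.2.2 == y)) (fun t => t.1)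
        vrstice ++ ["(" ++ PySem.Int.toStr y ++ ") " ++
          PySem.Str.join " " (xs.map (fun t =>
            PySem.Int.toStr t.1 ++ String.ofList (List.replicate (t.2.1 - t.1 + 1).toNat '-')))]) [])

-- ===== PRECONDITION & SPEC =====
def Spec_zapisi (ovire : List (Int × Int × Int)) (out : String) : Prop := out = zapisi_alt ovire
instance (ovire : List (Int × Int × Int)) (out : String) : Decidable (Spec_zapisi ovire out) := by unfold Spec_zapisi; infer_instance

-- ===== CLAIM (what is proved, stated in full; the proofs are below) =====
def Claim_equal_zapisi : Prop := ∀ (ovire : List (Int × Int × Int)), Dom_zapisi ovire → Spec_zapisi ovire (zapisi ovire)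

-- ===== LEMMAS AND PROOFS =====

-- the Boolean comparison sorted2 inserts with, for key (x[2], x[0])
def lexB (t u : Int × Int × Int) : Bool :=
  decide (t.2.2 < u.2.2) || !decide (u.2.2 < t.2.2) && decide (t.1 < u.1)

-- the comparison for sorting by x0 alone
def xB (t u : Int × Int × Int) : Bool := decide (t.1 < u.1)

-- the distinct y values, sorted, and the per-row (stably x0-sorted) block
def rowKeys (ovire : List (Int × Int × Int)) : List Int :=
  PySem.List.sorted (PySem.Set.ofList (ovire.map (fun t => t.2.2))) (fun y => y)
def rowBlk (ovire : List (Int × Int × Int)) (y : Int) : List (Int × Int × Int) :=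
  PySem.List.sorted (ovire.filter (fun t => t.2.2 == y)) (fun t => t.1)

theorem flatMap_congr_mem {α β : Type} {l : List α} {f g : α → List β}
    (h : ∀ a ∈ l, f a = g a) : l.flatMap f = l.flatMap g := by
  induction l with
  | nil => rfl
  | cons a l ih =>
      simp only [List.flatMap_cons, h a (by simp), ih (fun b hb => h b (by simp [hb]))]

theorem insertBy_all_before {α : Type} (before : α → α → Bool) (t : α) (r : List α)
    (h : ∀ u ∈ r, before t u = true) :
    PySem.List.insertBy before t r = t :: r := by
  cases r with
  | nil => rfl
  | cons u us => simp [PySem.List.insertBy, h u (by simp)]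

theorem insertBy_append_not_before {α : Type} (before : α → α → Bool) (t : α) (l r : List α)
    (h : ∀ u ∈ l, before t u = false) :
    PySem.List.insertBy before t (l ++ r) = l ++ PySem.List.insertBy before t r := by
  induction l with
  | nil => rfl
  | cons u us ih =>
      simp only [List.cons_append, PySem.List.insertBy, h u (by simp)]
      simp only [Bool.false_eq_true, if_false]
      rw [ih (fun v hv => h v (by simp [hv]))]

theorem insertBy_congr_append {α : Type} (before before' : α → α → Bool) (t : α) (m r : List α)
    (hm : ∀ u ∈ m, before t u = before' t u) (hr : ∀ u ∈ r, before t u = true) :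
    PySem.List.insertBy before t (m ++ r) = PySem.List.insertBy before' t m ++ r := by
  induction m with
  | nil => simp [insertBy_all_before before t r hr, PySem.List.insertBy]
  | cons u us ih =>
      have hu := hm u (by simp)
      by_cases hb : before' t u = true
      · simp [PySem.List.insertBy, hu, hb]
      · simp only [Bool.not_eq_true] at hb
        simp only [List.cons_append, PySem.List.insertBy, hu, hb, Bool.false_eq_true, if_false]
        rw [ih (fun v hv => hm v (by simp [hv]))]

theorem sorted_snoc {α κ : Type} [LT κ] [DecidableLT κ] (xs : List α) (x : α) (key : α → κ) :
    PySem.List.sorted (xs ++ [x]) key =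
      PySem.List.insertBy (fun a b => decide (key a < key b)) x (PySem.List.sorted xs key) := by
  simp [PySem.List.sorted, List.foldl_append]

theorem sorted2_snoc (xs : List (Int × Int × Int)) (x : Int × Int × Int) :
    PySem.List.sorted2 (xs ++ [x]) (fun t => t.2.2) (fun t => t.1) =
      PySem.List.insertBy lexB x (PySem.List.sorted2 xs (fun t => t.2.2) (fun t => t.1)) := by
  simp only [PySem.List.sorted2, List.foldl_append, List.foldl_cons, List.foldl_nil]
  rfl

-- membership in rowKeys is membership among the y values
theorem mem_rowKeys_iff (ovire : List (Int × Int × Int)) (y : Int) :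
    y ∈ rowKeys ovire ↔ y ∈ ovire.map (fun t => t.2.2) := by
  rw [rowKeys, PySem.List.mem_sorted, PySem.Set.mem_ofList]

-- inserting t into a key-blocked flatten lands inside (or creates) the block of t's key
theorem insert_flatMap (ks : List Int) (blk : Int → List (Int × Int × Int))
    (t : Int × Int × Int)
    (hks : ks.Pairwise (· < ·))
    (hkey : ∀ y ∈ ks, ∀ u ∈ blk y, u.2.2 = y)
    (hnew : t.2.2 ∉ ks → blk t.2.2 = []) :
    PySem.List.insertBy lexB t (ks.flatMap blk) =
      (if t.2.2 ∈ ks then ks else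
        PySem.List.insertBy (fun a b => decide (a < b)) t.2.2 ks).flatMap
        (fun y => if y = t.2.2 then PySem.List.insertBy xB t (blk y) else blk y) := by
  induction ks with
  | nil =>
      simp only [List.not_mem_nil, not_false_eq_true, List.flatMap_nil, if_neg]
      simp [PySem.List.insertBy, hnew (by simp)]
  | cons k ks' ih =>
      have hks' : ks'.Pairwise (· < ·) := hks.tail
      have hkgt : ∀ y ∈ ks', k < y := fun y hy => (List.pairwise_cons.mp hks).1 y hy
      rcases lt_trichotomy t.2.2 k with hlt | heq | hgt
      · -- t.2.2 < k : fresh key, t goes in front of everything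
        have hnotmem : t.2.2 ∉ k :: ks' := by
          intro hmem
          rcases List.mem_cons.mp hmem with h | h
          · omega
          · have := hkgt _ h; omega
        have hall : ∀ u ∈ (k :: ks').flatMap blk, lexB t u = true := by
          intro u hu
          rcases List.mem_flatMap.mp hu with ⟨y, hy, hub⟩
          have huy := hkey y hy u hub
          have hty : t.2.2 < y := by
            rcases List.mem_cons.mp hy with h | h
            · omega
            · have := hkgt _ h; omega
          simp [lexB, huy]
          omega
        rw [insertBy_all_before lexB t _ hall]
        have hins : PySem.List.insertBy (fun a b => decide (a < b)) t.2.2 (k :: ks')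
            = t.2.2 :: k :: ks' := by
          simp [PySem.List.insertBy, hlt]
        rw [if_neg hnotmem, hins]
        simp only [List.flatMap_cons]
        rw [hnew hnotmem]
        have h1 : (if k = t.2.2 then PySem.List.insertBy xB t (blk k) else blk k) = blk k := by
          rw [if_neg]; omega
        have h2 : ks'.flatMap (fun y => if y = t.2.2 then PySem.List.insertBy xB t (blk y) else blk y)
            = ks'.flatMap blk := by
          apply flatMap_congr_mem
          intro y hy
          rw [if_neg]
          have := hkgt _ hy; omega
        rw [h1, h2]
        simp [PySem.List.insertBy]
      · -- t.2.2 = k : t inserts inside the k-block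
        have hmem : t.2.2 ∈ k :: ks' := by simp [heq]
        rw [if_pos hmem]
        simp only [List.flatMap_cons]
        have hstep : PySem.List.insertBy lexB t (blk k ++ ks'.flatMap blk)
            = PySem.List.insertBy xB t (blk k) ++ ks'.flatMap blk := by
          apply insertBy_congr_append
          · intro u hu
            have hu2 := hkey k (by simp) u hu
            simp [lexB, xB, hu2, ← heq]
          · intro u hu
            rcases List.mem_flatMap.mp hu with ⟨y, hy, hub⟩
            have hu2 := hkey y (by simp [hy]) u hub
            have := hkgt _ hy
            simp [lexB, hu2]
            omega
        rw [hstep]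
        have h1 : (if k = t.2.2 then PySem.List.insertBy xB t (blk k) else blk k)
            = PySem.List.insertBy xB t (blk k) := by rw [if_pos heq.symm]
        have h2 : ks'.flatMap (fun y => if y = t.2.2 then PySem.List.insertBy xB t (blk y) else blk y)
            = ks'.flatMap blk := by
          apply flatMap_congr_mem
          intro y hy
          rw [if_neg]
          have := hkgt _ hy; omega
        rw [h1, h2]
      · -- k < t.2.2 : skip the k-block, recurse
        have hskip : PySem.List.insertBy lexB t (blk k ++ ks'.flatMap blk)
            = blk k ++ PySem.List.insertBy lexB t (ks'.flatMap blk) := by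
          apply insertBy_append_not_before
          intro u hu
          have hu2 := hkey k (by simp) u hu
          simp [lexB, hu2]
          omega
        have hnew' : t.2.2 ∉ ks' → blk t.2.2 = [] := by
          intro h
          apply hnew
          intro hc
          rcases List.mem_cons.mp hc with h' | h'
          · omega
          · exact h h'
        have ihx := ih hks' (fun y hy => hkey y (by simp [hy])) hnew'
        simp only [List.flatMap_cons]
        rw [hskip, ihx]
        have hmemiff : (t.2.2 ∈ k :: ks') ↔ (t.2.2 ∈ ks') := by
          constructor
          · intro h; rcases List.mem_cons.mp h with h' | h'
            · omega
            · exact h'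
          · intro h; exact List.mem_cons.mpr (Or.inr h)
        have hblkk : (if k = t.2.2 then PySem.List.insertBy xB t (blk k) else blk k) = blk k := by
          rw [if_neg]; omega
        by_cases hm : t.2.2 ∈ ks'
        · rw [if_pos (hmemiff.mpr hm), if_pos hm]
          simp only [List.flatMap_cons, hblkk]
        · rw [if_neg (fun h => hm (hmemiff.mp h)), if_neg hm]
          have hins : PySem.List.insertBy (fun a b => decide (a < b)) t.2.2 (k :: ks')
              = k :: PySem.List.insertBy (fun a b => decide (a < b)) t.2.2 ks' := by
            have : ¬ (t.2.2 < k) := by omega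
            simp [PySem.List.insertBy, this]
          rw [hins]
          simp only [List.flatMap_cons, hblkk]

-- the global stable (y,x0)-sort is the concatenation of the x0-sorted rows in key order
theorem sort_decomp (ovire : List (Int × Int × Int)) :
    PySem.List.sorted2 ovire (fun x => x.2.2) (fun x => x.1) =
      (rowKeys ovire).flatMap (rowBlk ovire) := by
  induction ovire using List.reverseRecOn with
  | nil => rfl
  | append_singleton os t ih =>
      rw [sorted2_snoc, ih]
      have hks : (rowKeys os).Pairwise (· < ·) := by
        have := PySem.List.sorted_ofList_pairwise_lt (xs := os.map (fun t => t.2.2))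
        exact this
      have hkey : ∀ y ∈ rowKeys os, ∀ u ∈ rowBlk os y, u.2.2 = y := by
        intro y _ u hu
        rw [rowBlk, PySem.List.mem_sorted, List.mem_filter] at hu
        have := hu.2
        simpa using this
      have hnew : t.2.2 ∉ rowKeys os → rowBlk os t.2.2 = [] := by
        intro h
        rw [mem_rowKeys_iff] at h
        rw [rowBlk]
        have : os.filter (fun u => u.2.2 == t.2.2) = [] := by
          rw [List.filter_eq_nil_iff]
          intro u hu
          simp only [beq_iff_eq]
          intro hc
          exact h (List.mem_map.mpr ⟨u, hu, hc⟩)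
        rw [this]
        rfl
      rw [insert_flatMap (rowKeys os) (rowBlk os) t hks hkey hnew]
      have hkeys : rowKeys (os ++ [t]) =
          (if t.2.2 ∈ rowKeys os then rowKeys os else
            PySem.List.insertBy (fun a b => decide (a < b)) t.2.2 (rowKeys os)) := by
        rw [rowKeys, List.map_append, List.map_cons, List.map_nil,
          PySem.Set.ofList_eq_foldl, List.foldl_append, ← PySem.Set.ofList_eq_foldl]
        simp only [List.foldl_cons, List.foldl_nil]
        by_cases hm : t.2.2 ∈ rowKeys os
        · have hm' : t.2.2 ∈ PySem.Set.ofList (os.map (fun t => t.2.2)) := by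
            rw [PySem.Set.mem_ofList]; rw [mem_rowKeys_iff] at hm; exact hm
          rw [if_pos hm]
          have : PySem.Set.add (PySem.Set.ofList (os.map (fun t => t.2.2))) t.2.2
              = PySem.Set.ofList (os.map (fun t => t.2.2)) := by
            simp [PySem.Set.add, List.contains_eq_mem, hm']
          rw [this, rowKeys]
        · have hm' : t.2.2 ∉ PySem.Set.ofList (os.map (fun t => t.2.2)) := by
            rw [PySem.Set.mem_ofList]; rw [mem_rowKeys_iff] at hm; exact hm
          rw [if_neg hm]
          have : PySem.Set.add (PySem.Set.ofList (os.map (fun t => t.2.2))) t.2.2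
              = PySem.Set.ofList (os.map (fun t => t.2.2)) ++ [t.2.2] := by
            simp [PySem.Set.add, List.contains_eq_mem, hm']
          rw [this, sorted_snoc, rowKeys]
      have hblk : (fun y => if y = t.2.2 then PySem.List.insertBy xB t (rowBlk os y)
            else rowBlk os y) = rowBlk (os ++ [t]) := by
        funext y
        conv_rhs => rw [rowBlk, List.filter_append, List.filter_cons, List.filter_nil]
        by_cases hy : y = t.2.2
        · subst hy
          rw [if_pos rfl]
          have hbt : ((t.2.2 == t.2.2) : Bool) = true := by simp
          rw [hbt, if_pos rfl, sorted_snoc, rowBlk]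
          rfl
        · have hb : (t.2.2 == y) = false := by simp; omega
          simp only [hb, Bool.false_eq_true, if_false, List.append_nil, if_neg hy]
          rw [rowBlk]
      rw [hkeys, hblk]

theorem takeWhile_append_all {α : Type} (p : α → Bool) (l r : List α)
    (h1 : ∀ a ∈ l, p a = true) (h2 : ∀ a ∈ r, p a = false) :
    (l ++ r).takeWhile p = l := by
  induction l with
  | nil =>
      cases r with
      | nil => rfl
      | cons w ws => simp [h2 w (by simp)]
  | cons w ws ih =>
      simp only [List.cons_append, List.takeWhile_cons, h1 w (by simp), if_true]
      rw [ih (fun a ha => h1 a (by simp [ha]))]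

theorem dropWhile_append_all {α : Type} (p : α → Bool) (l r : List α)
    (h1 : ∀ a ∈ l, p a = true) (h2 : ∀ a ∈ r, p a = false) :
    (l ++ r).dropWhile p = r := by
  induction l with
  | nil =>
      cases r with
      | nil => rfl
      | cons w ws => simp [h2 w (by simp)]
  | cons w ws ih =>
      simp only [List.cons_append, List.dropWhile_cons, h1 w (by simp), if_true]
      exact ih (fun a ha => h1 a (by simp [ha]))

-- groupby of a key-blocked flatten recovers the rows
theorem groupByY_flatMap (ks : List Int) (blk : Int → List (Int × Int × Int))
    (hks : ks.Pairwise (· < ·))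
    (hkey : ∀ y ∈ ks, ∀ u ∈ blk y, u.2.2 = y)
    (hne : ∀ y ∈ ks, blk y ≠ []) :
    groupByY (ks.flatMap blk) = ks.map (fun y => (y, blk y)) := by
  induction ks with
  | nil => simp [groupByY]
  | cons k ks' ih =>
      have hkgt : ∀ y ∈ ks', k < y := fun y hy => (List.pairwise_cons.mp hks).1 y hy
      obtain ⟨u, us, h⟩ : ∃ u us, blk k = u :: us := by
        cases hbk : blk k with
        | nil => exact absurd hbk (hne k (by simp))
        | cons u us => exact ⟨u, us, rfl⟩
      have huk : u.2.2 = k := hkey k (by simp) u (by rw [h]; exact List.mem_cons_self)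
      have hus : ∀ v ∈ us, (v.2.2 == u.2.2) = true := by
        intro v hv
        have := hkey k (by simp) v (by rw [h]; exact List.mem_cons_of_mem _ hv)
        simp [this, huk]
      have hrest : ∀ v ∈ ks'.flatMap blk, (v.2.2 == u.2.2) = false := by
        intro v hv
        rcases List.mem_flatMap.mp hv with ⟨y, hy, hvb⟩
        have hvy := hkey y (by simp [hy]) v hvb
        have := hkgt _ hy
        simp [hvy, huk]
        omega
      simp only [List.flatMap_cons, h, List.cons_append, List.map_cons]
      rw [groupByY, takeWhile_append_all _ _ _ hus hrest, dropWhile_append_all _ _ _ hus hrest,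
        huk, ← h]
      rw [ih hks.tail (fun y hy => hkey y (by simp [hy])) (fun y hy => hne y (by simp [hy]))]

-- ===== VERDICT (by name: the statement is the Claim_ definition above) =====
theorem zapisi_spec : Claim_equal_zapisi := by
  intro ovire _
  unfold Spec_zapisi zapisi zapisi_alt
  have hks : (rowKeys ovire).Pairwise (· < ·) :=
    PySem.List.sorted_ofList_pairwise_lt (xs := ovire.map (fun t => t.2.2))
  have hkey : ∀ y ∈ rowKeys ovire, ∀ u ∈ rowBlk ovire y, u.2.2 = y := by
    intro y _ u hu
    rw [rowBlk, PySem.List.mem_sorted, List.mem_filter] at hu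
    simpa using hu.2
  have hne : ∀ y ∈ rowKeys ovire, rowBlk ovire y ≠ [] := by
    intro y hy hnil
    rw [mem_rowKeys_iff] at hy
    rcases List.mem_map.mp hy with ⟨u, hu, huy⟩
    rw [rowBlk, PySem.List.sorted_eq_nil_iff, List.filter_eq_nil_iff] at hnil
    exact hnil u hu (by simp [huy])
  rw [sort_decomp, groupByY_flatMap (rowKeys ovire) (rowBlk ovire) hks hkey hne]
  rw [show PySem.List.sorted (PySem.Set.ofList (ovire.map (fun t => t.2.2))) (fun y => y)
        = rowKeys ovire from rfl]
  simp only [PySem.List.foldl_append_singleton_eq_map, List.nil_append, List.map_map]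
  congr 1
  apply List.map_congr_left
  intro y _
  simp only [Function.comp_apply, zapisi_vrstico, intervali,
    PySem.List.foldl_append_singleton_eq_map, List.nil_append, List.map_map]
  rw [show PySem.List.sorted (List.filter (fun t => t.2.2 == y) ovire) (fun t => t.1)
        = rowBlk ovire y from rfl]
  rfl
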